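-- pv_equiv track=rewrite | github.com/lily1029/leetcode | FindZeroSumSubset.py | find_zero_sum_subset
-- ===== SOURCE A (Python) =====
-- def find_zero_sum_subset(nums):
--     def backtrack(start, path):
--         if sum(path) == 0 and path:
--             return path
--         for i in range(start, len(nums)):
--             result = backtrack(i + 1, path + [nums[i]])
--             if result:
--                 return result
--         return []
--
--     return backtrack(0, [])
-- ===== SOURCE B (Python) =====
-- def find_zero_sum_subset(nums):
--     stack = [(0, [])]
--     while stack:
--         start, path = stack.pop()
--         if sum(path) == 0 and path:
--             return path
--         for i in reversed(range(start, len(nums))):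
--             stack.append((i + 1, path + [nums[i]]))
--     return []
-- ===== Notes on version B (the rewrite author's own statement) =====
-- stated objective: alternative
-- what changed: The recursive backtracking is replaced by an iterative DFS over an explicit stack of (start, path) frames, pushing children in reversed index order so the same include-first preorder subset is returned.
import Mathlib
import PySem

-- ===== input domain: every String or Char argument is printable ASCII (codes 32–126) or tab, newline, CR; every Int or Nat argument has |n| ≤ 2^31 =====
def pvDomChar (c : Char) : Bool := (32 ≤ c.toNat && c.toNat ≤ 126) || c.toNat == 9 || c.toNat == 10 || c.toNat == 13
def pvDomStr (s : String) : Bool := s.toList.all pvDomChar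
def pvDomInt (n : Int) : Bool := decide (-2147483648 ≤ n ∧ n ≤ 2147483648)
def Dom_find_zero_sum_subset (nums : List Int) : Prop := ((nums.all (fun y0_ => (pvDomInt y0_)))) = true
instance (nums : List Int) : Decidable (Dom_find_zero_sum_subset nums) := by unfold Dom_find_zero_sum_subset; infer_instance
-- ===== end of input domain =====

-- B rewrites A's recursive backtracking as an iterative DFS over an explicit stack of
-- (start, path) frames, pushing children in reversed index order; same returned value.

-- ===== PORT A =====
-- backtrack(start, path) and its for-loop, as mutual recursion; nums[i] with 0 ≤ i < len is exact via getD.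
mutual
def fzsBT (nums : List Int) (start : Nat) (path : List Int) : List Int :=
  if path.sum = 0 ∧ path ≠ [] then path
  else fzsFor nums start path
termination_by (nums.length + 1 - start, 1)
decreasing_by exact Prod.Lex.right _ (by omega)

def fzsFor (nums : List Int) (i : Nat) (path : List Int) : List Int :=
  if _h : i < nums.length then
    let result := fzsBT nums (i + 1) (path ++ [nums.getD i 0])
    if result ≠ [] then result else fzsFor nums (i + 1) path
  else []
termination_by (nums.length + 1 - i, 0)
decreasing_by
  · exact Prod.Lex.left _ _ (by omega)
  · exact Prod.Lex.left _ _ (by omega)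
end

def find_zero_sum_subset (nums : List Int) : List Int := fzsBT nums 0 []

-- ===== PORT B =====
-- The Lean stack is Source B's Python list reversed: head = top of stack (what .pop() removes).
-- Pushing children for i in reversed(range(start, len(nums))) thus prepends them in increasing i order.
def fzsWeight (n : Nat) (f : Nat × List Int) : Nat := 3 ^ (n + 1 - f.1)

def fzsM (n : Nat) (st : List (Nat × List Int)) : Nat := (st.map (fzsWeight n)).sum

-- termination helper for the stack loop: the pushed children weigh less than the popped frame
lemma fzs_childsum (k : Nat) : ∀ (n start : Nat), n - start = k →
    ((List.range' start (n - start)).map (fun i => 3 ^ (n + 1 - (i + 1)))).sum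
      < 3 ^ (n + 1 - start) := by
  induction k with
  | zero =>
    intro n start h
    rw [h]
    simp
  | succ k ih =>
    intro n start h
    have hlt : start < n := by omega
    rw [h, List.range'_succ]
    have h2 : n - (start + 1) = k := by omega
    have := ih n (start + 1) h2
    rw [h2] at this
    simp only [List.map_cons, List.sum_cons]
    have e1 : n + 1 - (start + 1) = n - start := by omega
    have e2 : n + 1 - start = (n - start) + 1 := by omega
    rw [e1] at this ⊢
    rw [e2, pow_succ]
    omega

def fzsRun (nums : List Int) (stack : List (Nat × List Int)) : List Int :=
  match stack with
  | [] => []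
  | (start, path) :: rest =>
    if path.sum = 0 ∧ path ≠ [] then path
    else fzsRun nums
      (((List.range' start (nums.length - start)).map
          (fun i => (i + 1, path ++ [nums.getD i 0]))) ++ rest)
termination_by fzsM nums.length stack
decreasing_by
  simp only [fzsM, List.map_append, List.sum_append, List.map_cons, List.sum_cons,
    List.map_map, fzsWeight, Function.comp_def]
  have := fzs_childsum (nums.length - start) nums.length start rfl
  omega

def find_zero_sum_subset_alt (nums : List Int) : List Int := fzsRun nums [(0, [])]

-- ===== PRECONDITION & SPEC =====
def Spec_find_zero_sum_subset (nums : List Int) (out : List Int) : Prop := out = find_zero_sum_subset_alt nums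
instance (nums : List Int) (out : List Int) : Decidable (Spec_find_zero_sum_subset nums out) := by unfold Spec_find_zero_sum_subset; infer_instance

-- ===== CLAIM (what is proved, stated in full; the proofs are below) =====
def Claim_equal_find_zero_sum_subset : Prop := ∀ (nums : List Int), Dom_find_zero_sum_subset nums → Spec_find_zero_sum_subset nums (find_zero_sum_subset nums)

-- ===== LEMMAS AND PROOFS =====

lemma fzsRun_nil (nums : List Int) : fzsRun nums [] = [] := by
  rw [fzsRun.eq_def]

lemma fzsRun_cons (nums : List Int) (start : Nat) (path : List Int)
    (rest : List (Nat × List Int)) :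
    fzsRun nums ((start, path) :: rest) =
      if path.sum = 0 ∧ path ≠ [] then path
      else fzsRun nums
        (((List.range' start (nums.length - start)).map
            (fun i => (i + 1, path ++ [nums.getD i 0]))) ++ rest) := by
  rw [fzsRun.eq_def]

-- children of a frame (s, p), as they appear on B's stack, starting at index i
def fzsFrames (nums : List Int) (p : List Int) (i : Nat) : List (Nat × List Int) :=
  (List.range' i (nums.length - i)).map (fun t => (t + 1, p ++ [nums.getD t 0]))

lemma fzsM_frames_lt (nums : List Int) (p : List Int) (s i : Nat) (hsi : s ≤ i)
    (rest : List (Nat × List Int)) :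
    fzsM nums.length (fzsFrames nums p i ++ rest) < fzsM nums.length ((s, p) :: rest) := by
  simp only [fzsM, fzsFrames, List.map_append, List.sum_append, List.map_cons, List.sum_cons,
    List.map_map, fzsWeight, Function.comp_def]
  have h1 := fzs_childsum (nums.length - i) nums.length i rfl
  have h2 : 3 ^ (nums.length + 1 - i) ≤ 3 ^ (nums.length + 1 - s) :=
    Nat.pow_le_pow_right (by norm_num) (by omega)
  omega

-- the key bridge: popping one frame from B's stack computes A's backtrack on that frame
lemma fzs_main (K : Nat) : ∀ (nums : List Int) (s : Nat) (p : List Int)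
    (rest : List (Nat × List Int)), fzsM nums.length ((s, p) :: rest) ≤ K →
    fzsRun nums ((s, p) :: rest) =
      if fzsBT nums s p ≠ [] then fzsBT nums s p else fzsRun nums rest := by
  induction K using Nat.strong_induction_on with
  | _ K IH =>
    intro nums s p rest hK
    rw [fzsRun_cons, fzsBT]
    by_cases hz : p.sum = 0 ∧ p ≠ []
    · simp [hz]
    · simp only [if_neg hz]
      have inner : ∀ (j i : Nat), nums.length - i = j → s ≤ i →
          fzsRun nums (fzsFrames nums p i ++ rest) =
            if fzsFor nums i p ≠ [] then fzsFor nums i p else fzsRun nums rest := by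
        intro j
        induction j with
        | zero =>
          intro i hj hsi
          rw [fzsFor]
          have : ¬ i < nums.length := by omega
          simp [fzsFrames, hj, this]
        | succ j ihj =>
          intro i hj hsi
          have hlt : i < nums.length := by omega
          have hframes : fzsFrames nums p i =
              (i + 1, p ++ [nums.getD i 0]) :: fzsFrames nums p (i + 1) := by
            simp only [fzsFrames, hj, List.range'_succ, List.map_cons]
            have : nums.length - (i + 1) = j := by omega
            rw [this]
          rw [hframes, List.cons_append]
          have hm : fzsM nums.length ((i + 1, p ++ [nums.getD i 0]) ::
              (fzsFrames nums p (i + 1) ++ rest)) < K := by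
            have h1 : ((i + 1, p ++ [nums.getD i 0]) :: (fzsFrames nums p (i + 1) ++ rest))
                = fzsFrames nums p i ++ rest := by rw [hframes, List.cons_append]
            rw [h1]
            exact lt_of_lt_of_le (fzsM_frames_lt nums p s i hsi rest) hK
          rw [IH _ hm nums (i + 1) (p ++ [nums.getD i 0]) (fzsFrames nums p (i + 1) ++ rest)
            (le_refl _)]
          rw [ihj (i + 1) (by omega) (by omega)]
          have hFor : fzsFor nums i p =
              if fzsBT nums (i + 1) (p ++ [nums.getD i 0]) ≠ []
              then fzsBT nums (i + 1) (p ++ [nums.getD i 0]) else fzsFor nums (i + 1) p := by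
            conv_lhs => rw [fzsFor]
            simp only [dif_pos hlt]
          rw [hFor]
          by_cases hr : fzsBT nums (i + 1) (p ++ [nums.getD i 0]) = []
          · rw [hr]; simp
          · simp only [ne_eq, hr, not_false_eq_true, if_true]
      have := inner (nums.length - s) s rfl (le_refl s)
      simpa [fzsFrames] using this

-- ===== VERDICT (by name: the statement is the Claim_ definition above) =====
theorem find_zero_sum_subset_spec : Claim_equal_find_zero_sum_subset := by
  intro nums _
  unfold Spec_find_zero_sum_subset find_zero_sum_subset find_zero_sum_subset_alt
  rw [fzs_main (fzsM nums.length [(0, ([] : List Int))]) nums 0 [] [] (le_refl _)]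
  by_cases h : fzsBT nums 0 [] = []
  · simp [h, fzsRun_nil]
  · simp [h]
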